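-- pv_equiv track=rewrite | github.com/phasehq/cli | phase_cli/utils/secret_referencing.py | _find_env_key_case_insensitive
-- ===== SOURCE A (Python) =====
-- from typing import Dict, List, Tuple, Optional, Set
--
-- def _find_env_key_case_insensitive(secrets_dict: Dict[str, Dict[str, Dict[str, str]]], env_name: str) -> Optional[str]:
--     """Find the appropriate environment key in secrets_dict for the given env_name.
--
--     Tries exact match first, then case-insensitive exact match, and finally
--     falls back to partial, case-insensitive containment (both directions).
--     """
--     # Exact match
--     if env_name in secrets_dict:
--         return env_name
--
--     # Case-insensitive exact match
--     lower_to_actual = {k.lower(): k for k in secrets_dict.keys()}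
--     candidate = lower_to_actual.get(env_name.lower())
--     if candidate:
--         return candidate
--
--     # Partial match (prefer shorter names to mimic existing selection heuristics)
--     env_lower = env_name.lower()
--     partials = [
--         k for k in secrets_dict.keys()
--         if env_lower in k.lower() or k.lower() in env_lower
--     ]
--     if partials:
--         return sorted(partials, key=lambda x: len(x))[0]
--
--     return None
-- ===== SOURCE B (Python) =====
-- from typing import Dict, Optional
--
-- def _find_env_key_case_insensitive(secrets_dict: Dict[str, Dict[str, Dict[str, str]]], env_name: str) -> Optional[str]:
--     """Single pass over the keys: exact membership check, then one loop that
--     tracks the last case-insensitive match and the first shortest partial match."""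
--     if env_name in secrets_dict:
--         return env_name
--     env_lower = env_name.lower()
--     ci_match = None
--     best_partial = None
--     for k in secrets_dict:
--         kl = k.lower()
--         if kl == env_lower:
--             ci_match = k
--         if (env_lower in kl or kl in env_lower) and (
--             best_partial is None or len(k) < len(best_partial)
--         ):
--             best_partial = k
--     return ci_match if ci_match is not None else best_partial
-- ===== Notes on version B (the rewrite author's own statement) =====
-- stated objective: simpler
-- what changed: Replaced A's lower->actual dict build, list filter and length-sort passes by a single fold over the keys that tracks the last case-insensitive match and the first shortest partial match.
import Mathlib
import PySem

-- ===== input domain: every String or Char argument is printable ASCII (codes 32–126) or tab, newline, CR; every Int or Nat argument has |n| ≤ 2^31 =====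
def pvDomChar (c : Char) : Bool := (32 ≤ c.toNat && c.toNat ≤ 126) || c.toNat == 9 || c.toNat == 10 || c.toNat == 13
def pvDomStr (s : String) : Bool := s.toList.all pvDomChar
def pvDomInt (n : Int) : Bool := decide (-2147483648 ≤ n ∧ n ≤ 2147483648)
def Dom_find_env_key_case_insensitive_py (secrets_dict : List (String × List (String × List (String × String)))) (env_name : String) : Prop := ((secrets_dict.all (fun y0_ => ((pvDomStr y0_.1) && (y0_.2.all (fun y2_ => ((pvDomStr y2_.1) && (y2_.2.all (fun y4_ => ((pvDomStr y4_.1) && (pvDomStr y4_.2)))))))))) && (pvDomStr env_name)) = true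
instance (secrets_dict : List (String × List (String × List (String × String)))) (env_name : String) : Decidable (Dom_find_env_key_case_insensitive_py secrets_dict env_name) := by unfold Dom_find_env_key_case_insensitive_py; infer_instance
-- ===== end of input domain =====

-- B replaces A's intermediate dict + filter-and-sort passes by one fold over the keys
-- tracking the last case-insensitive match and the first shortest partial match (objective: simpler).

-- ===== PORT A =====
-- Python dict iteration visits each distinct key once, at its first position: dedup of the assoc-list keys.
def find_env_key_case_insensitive_py (secrets_dict : List (String × List (String × List (String × String)))) (env_name : String) : Option String :=
  let keys := PySem.List.dedup (secrets_dict.map (·.1))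
  if env_name ∈ keys then some env_name
  else
    let lower_to_actual := PySem.Dict.ofList (keys.map (fun k => (PySem.Str.lower k, k)))
    let candidate := lower_to_actual.get? (PySem.Str.lower env_name)
    let env_lower := PySem.Str.lower env_name
    let partials := keys.filter (fun k =>
      PySem.Str.isIn env_lower (PySem.Str.lower k) || PySem.Str.isIn (PySem.Str.lower k) env_lower)
    let fallback :=
      match PySem.List.sorted partials (fun x => PySem.Str.len x) false with
      | [] => none
      | x :: _ => some x
    match candidate with
    | some c => if c == "" then fallback else some c   -- `if candidate:` — "" is falsy
    | none => fallback

-- ===== PORT B =====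
def find_env_key_case_insensitive_py_alt (secrets_dict : List (String × List (String × List (String × String)))) (env_name : String) : Option String :=
  let keys := PySem.List.dedup (secrets_dict.map (·.1))
  if env_name ∈ keys then some env_name
  else
    let env_lower := PySem.Str.lower env_name
    let st := keys.foldl (fun (st : Option String × Option String) k =>
      let kl := PySem.Str.lower k
      let ci := if kl == env_lower then some k else st.1
      let best := if (PySem.Str.isIn env_lower kl || PySem.Str.isIn kl env_lower)
          && (match st.2 with | none => true | some b => decide (PySem.Str.len k < PySem.Str.len b))
        then some k else st.2
      (ci, best)) (none, none)
    match st.1 with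
    | some c => some c
    | none => st.2

-- ===== PRECONDITION & SPEC =====
def Spec_find_env_key_case_insensitive_py (secrets_dict : List (String × List (String × List (String × String)))) (env_name : String) (out : Option String) : Prop := out = find_env_key_case_insensitive_py_alt secrets_dict env_name
instance (secrets_dict : List (String × List (String × List (String × String)))) (env_name : String) (out : Option String) : Decidable (Spec_find_env_key_case_insensitive_py secrets_dict env_name out) := by unfold Spec_find_env_key_case_insensitive_py; infer_instance

-- ===== CLAIM (what is proved, stated in full; the proofs are below) =====
def Claim_equal_find_env_key_case_insensitive_py : Prop := ∀ (secrets_dict : List (String × List (String × List (String × String)))) (env_name : String), Dom_find_env_key_case_insensitive_py secrets_dict env_name → Spec_find_env_key_case_insensitive_py secrets_dict env_name (find_env_key_case_insensitive_py secrets_dict env_name)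

-- ===== LEMMAS AND PROOFS =====

-- get? after a left fold of inserts = last matching pair, else the base dict's value
theorem get?_foldl_insert (ps : List (String × String)) (d : PySem.Dict String String) (q : String) :
    (ps.foldl (fun acc p => acc.insert p.1 p.2) d).get? q
      = ps.foldl (fun acc p => if q = p.1 then some p.2 else acc) (d.get? q) := by
  induction ps generalizing d with
  | nil => rfl
  | cons p rest ih =>
      simp only [List.foldl_cons, ih, PySem.Dict.get?_insert]

-- head of a stable insertion sort = first minimal element (PySem.List.min?)
theorem head?_sorted_eq_min? (xs : List String) (key : String → Int) :
    (PySem.List.sorted xs key false).head? = PySem.List.min? xs key := by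
  induction xs using List.reverseRecOn with
  | nil => rfl
  | append_singleton ys x ih =>
      rw [PySem.List.sorted_eq_foldl_insertBy] at *
      rw [List.foldl_append, List.foldl_cons, List.foldl_nil]
      unfold PySem.List.min?
      rw [List.foldl_append, List.foldl_cons, List.foldl_nil]
      unfold PySem.List.min? at ih
      rcases h : List.foldl (fun acc x => PySem.List.insertBy (fun a b => decide (key a < key b)) x acc) [] ys with _ | ⟨y, t⟩
      · rw [h] at ih
        simp only [List.head?] at ih
        rw [← ih]
        rfl
      · rw [h] at ih
        simp only [List.head?] at ih
        rw [← ih]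
        simp only [PySem.List.insertBy]
        split <;> simp_all

-- the B fold computes (last ci match, first-min partial) componentwise
theorem foldl_pair_split (ks : List String) (el : String) (c0 b0 : Option String) :
    ks.foldl (fun (st : Option String × Option String) k =>
      let kl := PySem.Str.lower k
      let ci := if kl == el then some k else st.1
      let best := if (PySem.Str.isIn el kl || PySem.Str.isIn kl el)
          && (match st.2 with | none => true | some b => decide (PySem.Str.len k < PySem.Str.len b))
        then some k else st.2
      (ci, best)) (c0, b0)
    = (ks.foldl (fun acc k => if PySem.Str.lower k == el then some k else acc) c0,
       (ks.filter (fun k => PySem.Str.isIn el (PySem.Str.lower k) || PySem.Str.isIn (PySem.Str.lower k) el)).foldl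
         (fun acc k => match acc with
           | none => some k
           | some m => if PySem.Str.len k < PySem.Str.len m then some k else some m) b0) := by
  induction ks generalizing c0 b0 with
  | nil => rfl
  | cons k rest ih =>
      simp only [List.foldl_cons, List.filter_cons]
      rw [ih]
      rcases hp : (PySem.Str.isIn el (PySem.Str.lower k) || PySem.Str.isIn (PySem.Str.lower k) el) with _ | _
      · simp
      · rw [if_pos rfl, List.foldl_cons]
        congr 1
        cases b0 <;> simp

-- B's best-partial fold = min? of the filtered keys
theorem best_eq_min? (ps : List String) :
    ps.foldl (fun acc k => match acc with
      | none => some k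
      | some m => if PySem.Str.len k < PySem.Str.len m then some k else some m) none
    = PySem.List.min? ps (fun x => PySem.Str.len x) := by
  simp only [PySem.List.min?]
  congr 1
  funext acc x
  cases acc <;> simp

theorem match_eq_head? (l : List String) :
    (match l with | [] => (none : Option String) | x :: _ => some x) = l.head? := by
  cases l <;> rfl

-- a ci result is a member of the keys with the right lowering
theorem ci_foldl_some (ks : List String) (el : String) (c0 : Option String) (c : String)
    (h : ks.foldl (fun acc k => if PySem.Str.lower k == el then some k else acc) c0 = some c) :
    (c ∈ ks ∧ PySem.Str.lower c = el) ∨ c0 = some c := by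
  induction ks generalizing c0 with
  | nil => exact Or.inr h
  | cons k rest ih =>
      simp only [List.foldl_cons] at h
      rcases ih _ h with ⟨hm, hl⟩ | hc
      · exact Or.inl ⟨List.mem_cons_of_mem _ hm, hl⟩
      · by_cases hk : (PySem.Str.lower k == el) = true
        · rw [if_pos hk] at hc
          cases hc
          exact Or.inl ⟨List.mem_cons_self, by simpa using hk⟩
        · rw [if_neg hk] at hc
          exact Or.inr hc

theorem lower_eq_empty (s : String) (h : PySem.Str.lower s = "") : s = "" := by
  have : (PySem.Str.lower s).toList = [] := by rw [h]; rfl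
  simp only [PySem.Str.lower, PySem.Chars.lower] at this
  rw [String.toList_ofList] at this
  have hs : s.toList = [] := by
    cases hx : s.toList with
    | nil => rfl
    | cons a t => rw [hx] at this; simp at this
  exact String.ext (by simp [hs])

-- ===== VERDICT (by name: the statement is the Claim_ definition above) =====
theorem find_env_key_case_insensitive_py_spec : Claim_equal_find_env_key_case_insensitive_py := by
  intro secrets_dict env_name _
  unfold Spec_find_env_key_case_insensitive_py
  unfold find_env_key_case_insensitive_py find_env_key_case_insensitive_py_alt
  simp only []
  set keys := PySem.List.dedup (secrets_dict.map (·.1)) with hkeys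
  by_cases hmem : env_name ∈ keys
  · simp [hmem]
  · simp only [if_neg hmem]
    set el := PySem.Str.lower env_name with hel
    rw [foldl_pair_split]
    -- candidate = ci fold
    have hcand : (PySem.Dict.ofList (keys.map (fun k => (PySem.Str.lower k, k)))).get? el
        = keys.foldl (fun acc k => if PySem.Str.lower k == el then some k else acc) none := by
      show (PySem.Dict.empty.update _).get? el = _
      unfold PySem.Dict.update
      rw [get?_foldl_insert]
      rw [List.foldl_map]
      have : PySem.Dict.get? (PySem.Dict.empty) el = (none : Option String) := rfl
      rw [this]
      have hfun : (fun (acc : Option String) (k : String) => if el = PySem.Str.lower k then some k else acc)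
          = (fun (acc : Option String) (k : String) => if PySem.Str.lower k == el then some k else acc) := by
        funext acc k
        simp only [beq_iff_eq]
        by_cases h : el = PySem.Str.lower k
        · simp [h]
        · rw [if_neg h, if_neg (fun hh => h hh.symm)]
      rw [hfun]
    -- fallback = min? fold
    have hfb : (match PySem.List.sorted (keys.filter (fun k =>
          PySem.Str.isIn el (PySem.Str.lower k) || PySem.Str.isIn (PySem.Str.lower k) el))
          (fun x => PySem.Str.len x) false with
        | [] => none | x :: _ => some x)
        = (keys.filter (fun k => PySem.Str.isIn el (PySem.Str.lower k) || PySem.Str.isIn (PySem.Str.lower k) el)).foldl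
            (fun acc k => match acc with
              | none => some k
              | some m => if PySem.Str.len k < PySem.Str.len m then some k else some m) none := by
      rw [best_eq_min?, ← head?_sorted_eq_min?, ← match_eq_head?]
    rw [hcand, hfb]
    rcases hci : keys.foldl (fun acc k => if PySem.Str.lower k == el then some k else acc) none with _ | c
    · rfl
    · -- c cannot be "" : otherwise env_name = "" ∈ keys
      have hcne : (c == "") = false := by
        rcases ci_foldl_some keys el none c hci with ⟨hm, hl⟩ | h
        · apply beq_eq_false_iff_ne.mpr
          intro hc
          rw [hc] at hl
          have h0 : PySem.Str.lower env_name = "" := by rw [← hel, ← hl]; decide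
          have hen : env_name = "" := lower_eq_empty env_name h0
          apply hmem
          rw [hen, ← hc]
          exact hm
        · cases h
      simp [hcne]
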